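-- pv_equiv track=rewrite | github.com/DonHK-97/Programmers | SW/function_dev_fin.py | solution
-- ===== SOURCE A (Python) =====
-- def solution(progresses, speeds):
--     answer = []
--     while progresses:
--         count = 0
--
--         for index in range(len(progresses)):
--             progresses[index] += speeds[index]
--
--         while progresses:
--             if progresses[0] >= 100:
--                 progresses.pop(0)
--                 speeds.pop(0)
--                 count += 1
--             else:
--                 break
--
--         if count:
--             answer.append(count)
--
--     return answer
-- ===== SOURCE B (Python) =====
-- def solution(progresses, speeds):
--     # compute each task's completion day in closed form (ceil division),
--     # then group consecutive tasks whose day does not exceed the group leader's.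
--     answer = []
--     count = 0
--     cur = None
--     for p, s in zip(progresses, speeds):
--         d = max(1, -((p - 100) // s))
--         if cur is None or d > cur:
--             if count:
--                 answer.append(count)
--             cur = d
--             count = 1
--         else:
--             count += 1
--     if count:
--         answer.append(count)
--     return answer
-- ===== Notes on version B (the rewrite author's own statement) =====
-- stated objective: alternative
-- what changed: Replaces the day-by-day simulation (increment every remaining progress each day, pop the finished prefix) by a closed-form ceiling-division completion day per task and a single grouping pass; intended as asymptotically faster (a timing run saw A time out at n=16 where B returned, but could not measure a ratio).
-- outside the precondition, e.g. on solution([150], [0]): A returns [1], B raises ZeroDivisionError; on solution([1, 200], [1, -1]): A returns [2], B returns [1, 1]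
import Mathlib
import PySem

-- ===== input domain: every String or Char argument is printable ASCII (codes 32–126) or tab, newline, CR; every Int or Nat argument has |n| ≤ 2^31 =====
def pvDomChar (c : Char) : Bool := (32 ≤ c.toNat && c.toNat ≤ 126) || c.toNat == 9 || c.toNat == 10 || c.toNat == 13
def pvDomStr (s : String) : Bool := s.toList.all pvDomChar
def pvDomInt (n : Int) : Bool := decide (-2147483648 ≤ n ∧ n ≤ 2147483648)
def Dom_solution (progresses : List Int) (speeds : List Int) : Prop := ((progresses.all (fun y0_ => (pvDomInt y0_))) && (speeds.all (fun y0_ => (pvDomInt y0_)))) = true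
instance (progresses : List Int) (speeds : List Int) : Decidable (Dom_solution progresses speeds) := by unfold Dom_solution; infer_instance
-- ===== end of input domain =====

-- B replaces A's day-by-day simulation by closed-form completion days (ceiling division) and one
-- grouping pass; equivalence is about the RETURN value only (A empties its argument lists in
-- place, B does not mutate them).

-- ===== PORT A =====
-- Python inner `while progresses: if progresses[0] >= 100: pop(0) both; else break`
def popA : List Int → List Int → Int → Int × List Int × List Int
  | p :: ps, s :: ss, c => if 100 ≤ p then popA ps ss (c + 1) else (c, p :: ps, s :: ss)
  | ps, ss, c => (c, ps, ss)

-- fuel for the outer `while progresses` loop (a totality guard only; the equivalence proof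
-- shows it suffices on Pre_, where each task finishes within (100 - p).toNat days)
def measA (prog : List Int) : Nat := (prog.map (fun p => (100 - p).toNat + 1)).sum

def solA_loop : Nat → List Int → List Int → List Int → List Int
  | 0, _, _, answer => answer
  | fuel + 1, progresses, speeds, answer =>
    if progresses.isEmpty then answer
    else
      -- for index in range(len(progresses)): progresses[index] += speeds[index]
      let progresses := List.zipWith (· + ·) progresses speeds
      let r := popA progresses speeds 0
      let answer := if r.1 ≠ 0 then answer ++ [r.1] else answer
      solA_loop fuel r.2.1 r.2.2 answer

def solution (progresses : List Int) (speeds : List Int) : List Int :=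
  solA_loop (measA progresses + 1) progresses speeds []

-- ===== PORT B =====
-- d = max(1, -((p - 100) // s)) : the day on which task (p, s) reaches 100
def daysB (p s : Int) : Int := max 1 (-(PySem.Int.floordiv (p - 100) s))

def solB_go : List (Int × Int) → Option Int → Int → List Int → List Int
  | [], _, count, answer => if count ≠ 0 then answer ++ [count] else answer
  | q :: rest, cur, count, answer =>
    let d := daysB q.1 q.2
    match cur with
    | none => solB_go rest (some d) 1 (if count ≠ 0 then answer ++ [count] else answer)
    | some c =>
      if c < d then solB_go rest (some d) 1 (if count ≠ 0 then answer ++ [count] else answer)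
      else solB_go rest (some c) (count + 1) answer

def solution_alt (progresses : List Int) (speeds : List Int) : List Int :=
  solB_go (progresses.zip speeds) none 0 []

-- ===== PRECONDITION & SPEC =====
-- Pre_ is the natural domain of the task: at least as many speeds as tasks (A raises IndexError
-- when speeds runs short) and every paired speed positive — with a non-positive speed A's
-- day-by-day loop diverges on almost all inputs, and on the exceptional such inputs where it
-- still returns (a task already at/above 100) B's ceiling-division day is meaningless: B raises
-- ZeroDivisionError for speed 0 and may split groups differently for negative speeds.
def Pre_solution (progresses : List Int) (speeds : List Int) : Prop :=
  progresses.length ≤ speeds.length ∧ ∀ q ∈ progresses.zip speeds, 1 ≤ q.2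
instance (progresses : List Int) (speeds : List Int) : Decidable (Pre_solution progresses speeds) := by
  unfold Pre_solution; infer_instance

def pvWitness_solution : List Int × List Int := ([93, 30, 55], [1, 30, 5])

def Spec_solution (progresses : List Int) (speeds : List Int) (out : List Int) : Prop := out = solution_alt progresses speeds
instance (progresses : List Int) (speeds : List Int) (out : List Int) : Decidable (Spec_solution progresses speeds out) := by unfold Spec_solution; infer_instance

-- ===== CLAIM (what is proved, stated in full; the proofs are below) =====
def Claim_equal_solution : Prop := ∀ (progresses : List Int) (speeds : List Int), Dom_solution progresses speeds → Pre_solution progresses speeds → Spec_solution progresses speeds (solution progresses speeds)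

-- ===== LEMMAS AND PROOFS =====

-- the common denominator of both proofs: group sizes of the runs of non-increasing deploy days
def groups : List Int → List Int
  | [] => []
  | d :: rest =>
    (1 + ((rest.takeWhile (fun x => x ≤ d)).length : Int)) :: groups (rest.dropWhile (fun x => x ≤ d))
termination_by l => l.length
decreasing_by
  have := List.length_dropWhile_le (fun x => decide (x ≤ d)) rest
  simp; omega

lemma groups_cons (d : Int) (rest : List Int) :
    groups (d :: rest)
      = (1 + ((rest.takeWhile (fun x => x ≤ d)).length : Int))
        :: groups (rest.dropWhile (fun x => x ≤ d)) := by
  rw [groups]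

lemma takeWhile_congr_mem {α : Type} (l : List α) (p q : α → Bool)
    (h : ∀ a ∈ l, p a = q a) : l.takeWhile p = l.takeWhile q := by
  induction l with
  | nil => rfl
  | cons a t ih =>
    simp only [List.takeWhile_cons, h a (by simp)]
    cases q a with
    | true => simp [ih fun b hb => h b (by simp [hb])]
    | false => rfl

lemma dropWhile_congr_mem {α : Type} (l : List α) (p q : α → Bool)
    (h : ∀ a ∈ l, p a = q a) : l.dropWhile p = l.dropWhile q := by
  induction l with
  | nil => rfl
  | cons a t ih =>
    simp only [List.dropWhile_cons, h a (by simp)]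
    cases q a with
    | true => simp [ih fun b hb => h b (by simp [hb])]
    | false => rfl

-- arithmetic facts about the closed-form day
lemma daysB_pos (p s : Int) : 1 ≤ daysB p s := le_max_left _ _

lemma daysB_eq_one_iff (p s : Int) (hs : 1 ≤ s) : daysB p s = 1 ↔ 100 ≤ p + s := by
  have h := PySem.Int.le_floordiv_iff_mul_le (a := p - 100) (b := s) (q := -1) (by omega)
  unfold daysB
  generalize PySem.Int.floordiv (p - 100) s = f at h
  constructor
  · intro h1
    have := h.mp (by omega)
    omega
  · intro h1
    have := h.mpr (by omega)
    omega

lemma daysB_step (p s : Int) (hs : 1 ≤ s) :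
    daysB (p + s) s = max 1 (daysB p s - 1) := by
  unfold daysB
  rw [PySem.Int.floordiv_eq_ediv_of_pos (by omega), PySem.Int.floordiv_eq_ediv_of_pos (by omega)]
  have h : p + s - 100 = (p - 100) + 1 * s := by ring
  rw [h, Int.add_mul_ediv_right _ _ (by omega : s ≠ 0)]
  generalize (p - 100) / s = f
  omega

-- B's pass computes `groups` of the day list
lemma B_some (rest : List (Int × Int)) (c k : Int) (ans : List Int) (hk : 1 ≤ k) :
    solB_go rest (some c) k ans
      = ans ++ (k + (((rest.map (fun q => daysB q.1 q.2)).takeWhile (fun x => x ≤ c)).length : Int))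
          :: groups ((rest.map (fun q => daysB q.1 q.2)).dropWhile (fun x => x ≤ c)) := by
  induction rest generalizing c k ans with
  | nil =>
    simp only [solB_go]
    rw [if_pos (by omega : k ≠ 0)]
    simp [groups]
  | cons q t ih =>
    simp only [solB_go, List.map_cons, List.takeWhile_cons, List.dropWhile_cons]
    by_cases hd : c < daysB q.1 q.2
    · rw [if_pos hd, ih _ _ _ (by omega), if_pos (by omega : k ≠ 0)]
      have hb : (decide (daysB q.1 q.2 ≤ c)) = false := by simp; omega
      simp [hb, groups]
    · rw [if_neg hd, ih _ _ _ (by omega)]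
      have hb : (decide (daysB q.1 q.2 ≤ c)) = true := by simp; omega
      simp only [hb, if_true, List.length_cons]
      congr 2
      push_cast
      ring

lemma B_eq (L : List (Int × Int)) (ans : List Int) :
    solB_go L none 0 ans = ans ++ groups (L.map (fun q => daysB q.1 q.2)) := by
  cases L with
  | nil => simp [solB_go, groups]
  | cons q t =>
    simp only [solB_go, List.map_cons]
    rw [B_some _ _ _ _ (by omega)]
    simp [groups_cons]

-- pop phase of A, characterised by takeWhile/dropWhile on the paired list
lemma popA_char (L : List (Int × Int)) (tail : List Int) (c : Int) :
    popA (L.map Prod.fst) (L.map Prod.snd ++ tail) c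
      = (c + ((L.takeWhile (fun q => 100 ≤ q.1)).length : Int),
         (L.dropWhile (fun q => 100 ≤ q.1)).map Prod.fst,
         (L.dropWhile (fun q => 100 ≤ q.1)).map Prod.snd ++ tail) := by
  induction L generalizing c with
  | nil =>
    cases tail with
    | nil => simp [popA]
    | cons s ss => simp [popA]
  | cons q t ih =>
    simp only [List.map_cons, List.cons_append, popA, List.takeWhile_cons, List.dropWhile_cons]
    by_cases h : 100 ≤ q.1
    · rw [if_pos h, ih]
      simp [h]
      push_cast; ring
    · rw [if_neg h]
      simp [h]

lemma zipWith_map_fst_snd (L : List (Int × Int)) (tail : List Int) :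
    List.zipWith (· + ·) (L.map Prod.fst) (L.map Prod.snd ++ tail) = L.map (fun q => q.1 + q.2) := by
  induction L with
  | nil => simp
  | cons q t ih => simp [ih]

-- shift lemma: decrementing all days (floored at 1) does not change the grouping
-- as long as the front day is at least 2
lemma groups_shift (t : List Int) (h1 : ∀ d ∈ t, 1 ≤ d)
    (h2 : ∀ h, t.head? = some h → 2 ≤ h) :
    groups (t.map (fun d => max 1 (d - 1))) = groups t := by
  induction hlen : t.length using Nat.strong_induction_on generalizing t with
  | _ n ih =>
    cases t with
    | nil => rfl
    | cons d rest =>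
      have hd : 2 ≤ d := h2 d rfl
      have hmax : max 1 (d - 1) = d - 1 := by omega
      simp only [List.map_cons, hmax, groups_cons]
      have htw : (List.map (fun d => max 1 (d - 1)) rest).takeWhile (fun x => x ≤ d - 1)
          = (rest.takeWhile (fun x => x ≤ d)).map (fun d => max 1 (d - 1)) := by
        rw [List.takeWhile_map]
        congr 1
        apply takeWhile_congr_mem
        intro a ha
        have : 1 ≤ a := h1 a (by simp [ha])
        by_cases hcase : a ≤ d <;> simp [Function.comp] <;> omega
      have hdw : (List.map (fun d => max 1 (d - 1)) rest).dropWhile (fun x => x ≤ d - 1)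
          = (rest.dropWhile (fun x => x ≤ d)).map (fun d => max 1 (d - 1)) := by
        rw [List.dropWhile_map]
        congr 1
        apply dropWhile_congr_mem
        intro a ha
        have : 1 ≤ a := h1 a (by simp [ha])
        by_cases hcase : a ≤ d <;> simp [Function.comp] <;> omega
      rw [htw, hdw]
      congr 1
      · simp
      · apply ih (rest.dropWhile (fun x => x ≤ d)).length ?_ _ ?_ ?_ rfl
        · subst hlen
          have := List.length_dropWhile_le (fun x => decide (x ≤ d)) rest
          simp; omega
        · intro a ha
          exact h1 a (by simp [(List.dropWhile_sublist _).mem ha])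
        · intro h hh
          have hp := List.head?_dropWhile_not (fun x => decide (x ≤ d)) rest
          rw [hh] at hp
          simp at hp
          omega

-- one outer iteration of A, seen on the day list
lemma groups_step (ds : List Int) (h1 : ∀ d ∈ ds, 1 ≤ d) :
    groups ds
      = (if (((ds.takeWhile (fun x => x = 1)).length : Int)) ≠ 0
           then [((ds.takeWhile (fun x => x = 1)).length : Int)] else [])
        ++ groups ((ds.dropWhile (fun x => x = 1)).map (fun d => max 1 (d - 1))) := by
  cases ds with
  | nil => simp [groups]
  | cons d rest =>
    have hd1 : 1 ≤ d := h1 d (by simp)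
    by_cases hd : d = 1
    · subst hd
      have htw : rest.takeWhile (fun x => x ≤ (1:Int)) = rest.takeWhile (fun x => x = 1) := by
        apply takeWhile_congr_mem
        intro a ha
        have : 1 ≤ a := h1 a (by simp [ha])
        by_cases hc : a = 1 <;> simp [hc] <;> omega
      have hdw : rest.dropWhile (fun x => x ≤ (1:Int)) = rest.dropWhile (fun x => x = 1) := by
        apply dropWhile_congr_mem
        intro a ha
        have : 1 ≤ a := h1 a (by simp [ha])
        by_cases hc : a = 1 <;> simp [hc] <;> omega
      have h2' : ∀ a ∈ rest.dropWhile (fun x => x = (1:Int)), 1 ≤ a := by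
        intro a ha
        exact h1 a (by simp [(List.dropWhile_sublist _).mem ha])
      have hhead : ∀ h, (rest.dropWhile (fun x => x = (1:Int))).head? = some h → 2 ≤ h := by
        intro h hh
        have hne := List.head?_dropWhile_not (fun x : Int => decide (x = 1)) rest
        rw [hh] at hne
        simp at hne
        have hmem : h ∈ rest.dropWhile (fun x => x = (1:Int)) := List.mem_of_mem_head? hh
        have := h2' h hmem
        omega
      have hts : (List.takeWhile (fun x => x = (1:Int)) (1 :: rest))
          = 1 :: rest.takeWhile (fun x => x = 1) := by simp [List.takeWhile_cons]
      have hds : (List.dropWhile (fun x => x = (1:Int)) (1 :: rest))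
          = rest.dropWhile (fun x => x = 1) := by simp [List.dropWhile_cons]
      rw [groups_cons, htw, hdw, hts, hds, groups_shift _ h2' hhead]
      simp only [List.length_cons]
      have hcond : ((((rest.takeWhile (fun x => x = (1:Int))).length + 1 : Nat) : Int)) ≠ 0 := by
        push_cast; omega
      rw [if_pos hcond]
      simp only [List.singleton_append]
      congr 1
      push_cast
      ring
    · have htw : (d :: rest).takeWhile (fun x => x = (1:Int)) = [] := by
        simp [List.takeWhile_cons, hd]
      have hdw : (d :: rest).dropWhile (fun x => x = (1:Int)) = d :: rest := by
        simp [List.dropWhile_cons, hd]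
      rw [htw, hdw, groups_shift (d :: rest) h1 (by intro h hh; simp at hh; omega)]
      simp

-- pointwise bounds for the fuel measure
lemma meas_incr_le (l : List (Int × Int)) (hs : ∀ q ∈ l, 1 ≤ q.2) :
    ((l.map (fun q => (100 - (q.1 + q.2)).toNat + 1)).sum : Nat)
      ≤ (l.map (fun q => (100 - q.1).toNat + 1)).sum := by
  induction l with
  | nil => simp
  | cons q t ih =>
    have h1 : 1 ≤ q.2 := hs q (by simp)
    have h2 := ih (fun a ha => hs a (by simp [ha]))
    simp only [List.map_cons, List.sum_cons]
    have : (100 - (q.1 + q.2)).toNat ≤ (100 - q.1).toNat := by omega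
    omega

lemma sum_map_dropWhile_le (l : List (Int × Int)) (p : Int × Int → Bool) (f : Int × Int → Nat) :
    (((l.dropWhile p).map f).sum : Nat) ≤ (l.map f).sum := by
  induction l with
  | nil => simp
  | cons a t ih =>
    simp only [List.dropWhile_cons]
    split
    · simp only [List.map_cons, List.sum_cons]
      omega
    · exact le_refl _

-- the fuel measure strictly decreases across one outer iteration of A
lemma meas_decrease (L : List (Int × Int)) (hL : L ≠ [])
    (hs : ∀ a ∈ L, 1 ≤ a.2) :
    measA (((L.dropWhile (fun p => 100 ≤ p.1 + p.2)).map (fun p => (p.1 + p.2, p.2))).map Prod.fst)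
      < measA (L.map Prod.fst) := by
  cases L with
  | nil => exact absurd rfl hL
  | cons q t =>
    have hq2 : 1 ≤ q.2 := hs q (by simp)
    have hmeasL : ∀ (l : List (Int × Int)),
        measA ((l.map (fun p => (p.1 + p.2, p.2))).map Prod.fst)
          = (l.map (fun p => (100 - (p.1 + p.2)).toNat + 1)).sum := by
      intro l
      unfold measA
      rw [List.map_map, List.map_map]
      rfl
    have hmeasR : ∀ (l : List (Int × Int)),
        measA (l.map Prod.fst) = (l.map (fun p => (100 - p.1).toNat + 1)).sum := by
      intro l
      unfold measA
      rw [List.map_map]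
      rfl
    rw [hmeasL, hmeasR]
    simp only [List.dropWhile_cons]
    by_cases hq : 100 ≤ q.1 + q.2
    · rw [if_pos (by simpa using hq)]
      have h1 : ((t.dropWhile (fun p => 100 ≤ p.1 + p.2)).map
            (fun p => (100 - (p.1 + p.2)).toNat + 1)).sum
          ≤ (t.map (fun p => (100 - (p.1 + p.2)).toNat + 1)).sum :=
        sum_map_dropWhile_le t _ _
      have h2 : ((t.map (fun p => (100 - (p.1 + p.2)).toNat + 1)).sum : Nat)
          ≤ (t.map (fun p => (100 - p.1).toNat + 1)).sum :=
        meas_incr_le t (fun a ha => hs a (by simp [ha]))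
      simp only [List.map_cons, List.sum_cons]
      omega
    · rw [if_neg (by simpa using hq)]
      have h2 : ((t.map (fun p => (100 - (p.1 + p.2)).toNat + 1)).sum : Nat)
          ≤ (t.map (fun p => (100 - p.1).toNat + 1)).sum :=
        meas_incr_le t (fun a ha => hs a (by simp [ha]))
      simp only [List.map_cons, List.sum_cons]
      have : (100 - (q.1 + q.2)).toNat < (100 - q.1).toNat := by omega
      omega

-- relating the popped count and the remaining tasks to the day list
lemma count_step (L : List (Int × Int)) (hs : ∀ a ∈ L, 1 ≤ a.2) :
    ((L.takeWhile (fun p => 100 ≤ p.1 + p.2)).length : Nat)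
      = ((L.map (fun q => daysB q.1 q.2)).takeWhile (fun x => x = 1)).length := by
  rw [List.takeWhile_map, List.length_map]
  congr 1
  apply takeWhile_congr_mem
  intro a ha
  have h1 : 1 ≤ a.2 := hs a ha
  have := daysB_eq_one_iff a.1 a.2 h1
  simp only [Function.comp]
  by_cases hc : 100 ≤ a.1 + a.2 <;> simp [hc] <;> omega

lemma days_list_step (L : List (Int × Int)) (hs : ∀ a ∈ L, 1 ≤ a.2) :
    ((L.dropWhile (fun p => 100 ≤ p.1 + p.2)).map (fun p => (p.1 + p.2, p.2))).map
        (fun q => daysB q.1 q.2)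
      = ((L.map (fun q => daysB q.1 q.2)).dropWhile (fun x => x = 1)).map
          (fun d => max 1 (d - 1)) := by
  rw [List.dropWhile_map, List.map_map, List.map_map]
  rw [dropWhile_congr_mem L ((fun x => decide (x = 1)) ∘ fun q => daysB q.1 q.2)
        (fun p => decide (100 ≤ p.1 + p.2)) ?_]
  · apply List.map_congr_left
    intro a ha
    have h1 : 1 ≤ a.2 := hs a ((List.dropWhile_sublist _).mem ha)
    simp only [Function.comp]
    exact daysB_step a.1 a.2 h1
  · intro a ha
    have h1 : 1 ≤ a.2 := hs a ha
    have := daysB_eq_one_iff a.1 a.2 h1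
    simp only [Function.comp]
    by_cases hc : 100 ≤ a.1 + a.2 <;> simp [hc] <;> omega

-- the main simulation lemma: A's loop produces `groups` of the day list
lemma A_main (fuel : Nat) (L : List (Int × Int)) (tail ans : List Int)
    (hs : ∀ q ∈ L, 1 ≤ q.2) (hf : measA (L.map Prod.fst) < fuel) :
    solA_loop fuel (L.map Prod.fst) (L.map Prod.snd ++ tail) ans
      = ans ++ groups (L.map (fun q => daysB q.1 q.2)) := by
  induction fuel generalizing L tail ans with
  | zero => omega
  | succ fuel ih =>
    by_cases hL : L = []
    · subst hL
      simp [solA_loop, groups]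
    · have hne : (L.map Prod.fst).isEmpty = false := by
        simp [List.isEmpty_iff, hL]
      simp only [solA_loop, hne, Bool.false_eq_true, if_false]
      rw [zipWith_map_fst_snd]
      have hinc1 : L.map (fun p => p.1 + p.2)
          = (L.map (fun p => (p.1 + p.2, p.2))).map Prod.fst := by
        simp [List.map_map, Function.comp]
      have hinc2 : L.map Prod.snd ++ tail
          = (L.map (fun p => (p.1 + p.2, p.2))).map Prod.snd ++ tail := by
        simp [List.map_map, Function.comp]
      rw [hinc1, hinc2, popA_char, List.dropWhile_map, List.takeWhile_map]
      have hcomp : ((fun q : Int × Int => decide (100 ≤ q.1)) ∘ fun p : Int × Int => (p.1 + p.2, p.2))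
          = fun p : Int × Int => decide (100 ≤ p.1 + p.2) := rfl
      rw [hcomp]
      rw [ih ((L.dropWhile (fun p => 100 ≤ p.1 + p.2)).map (fun p => (p.1 + p.2, p.2))) tail _
        (by
          intro a ha
          simp only [List.mem_map] at ha
          obtain ⟨b, hb, rfl⟩ := ha
          exact hs b ((List.dropWhile_sublist _).mem hb))
        (by
          have := meas_decrease L hL hs
          omega)]
      rw [days_list_step L hs]
      rw [groups_step (L.map (fun q => daysB q.1 q.2))
        (by
          intro d hd
          simp only [List.mem_map] at hd
          obtain ⟨b, hb, rfl⟩ := hd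
          exact daysB_pos b.1 b.2)]
      have hcnt : ((List.takeWhile (fun p => decide (100 ≤ p.1 + p.2)) L).map
            (fun p => (p.1 + p.2, p.2))).length
          = ((L.map (fun q => daysB q.1 q.2)).takeWhile (fun x => x = 1)).length := by
        rw [List.length_map]
        exact count_step L hs
      rw [List.length_map, count_step L hs]
      simp only [zero_add]
      split_ifs with h
      · simp
      · simp

lemma zip_snd_append (a b : List Int) (h : a.length ≤ b.length) :
    (a.zip b).map Prod.snd ++ b.drop a.length = b := by
  induction a generalizing b with
  | nil => simp
  | cons x t ih =>
    cases b with
    | nil => simp at h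
    | cons y u =>
      simp only [List.zip_cons_cons, List.map_cons, List.cons_append, List.length_cons,
        List.drop_succ_cons]
      rw [ih u (by simpa using h)]

-- ===== VERDICT (by name: the statement is the Claim_ definition above) =====
theorem solution_spec : Claim_equal_solution := by
  intro prog speeds _hdom hpre
  obtain ⟨hlen, hs⟩ := hpre
  unfold Spec_solution solution solution_alt
  rw [B_eq]
  have h1 : (prog.zip speeds).map Prod.fst = prog := List.map_fst_zip hlen
  have h2 : (prog.zip speeds).map Prod.snd ++ speeds.drop prog.length = speeds :=
    zip_snd_append prog speeds hlen
  have hmain := A_main (measA prog + 1) (prog.zip speeds) (speeds.drop prog.length) [] hs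
    (by rw [h1]; omega)
  rw [h1, h2] at hmain
  exact hmain
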